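-- pv_equiv track=rewrite | github.com/HyeM207/Algorithm | Programmers/Lv_2/[Prg] 마법의 엘리베이터.py | solution
-- ===== SOURCE A (Python) =====
-- def solution(storey):
--     """
--     풀이 2(타풀이 참고)
--      : 완전 탐색없이, "1의 자리부터 iter<=4 또는 (iter==5 and 앞자리가 없거나 앞자리<=4일때)만 내림하고 나머지 올림"하기
--     """
--     answer = 0
--     nums = [int(digit) for digit in str(storey)[::-1]]
--
--     for i in range(len(nums)):
--         n = nums[i]
--         if n < 5 or (n == 5 and (i+1 >= len(nums) or (i+1 < len(nums) and nums[i+1] <= 4))):  # 내림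
--             answer += n
--         else: # 올림
--             answer += 10 - n
--             if i+1 < len(nums):
--                 nums[i+1] += 1
--             else: # <= 마지막 자리 일 경우 +1 하기
--                 answer += 1
--
--     return answer
-- ===== SOURCE B (Python) =====
-- def solution(storey):
--     # Two-way recursion over the decimal digits: either pay the last digit and
--     # round down, or pay its complement and carry one into the higher part.
--     if storey < 10:
--         if storey < 0:
--             raise ValueError("storey must be non-negative")
--         return min(storey, 11 - storey)
--     d = storey % 10
--     rest = storey // 10
--     return min(d + solution(rest), (10 - d) + solution(rest + 1))
-- ===== Notes on version B (the rewrite author's own statement) =====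
-- stated objective: simpler
-- what changed: Replaces A's reversed-digit string list, explicit in-place carry and 5-with-look-ahead tie-break by a plain recursion on the number itself taking min over 'round down' vs 'round up with carry'.
import Mathlib
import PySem

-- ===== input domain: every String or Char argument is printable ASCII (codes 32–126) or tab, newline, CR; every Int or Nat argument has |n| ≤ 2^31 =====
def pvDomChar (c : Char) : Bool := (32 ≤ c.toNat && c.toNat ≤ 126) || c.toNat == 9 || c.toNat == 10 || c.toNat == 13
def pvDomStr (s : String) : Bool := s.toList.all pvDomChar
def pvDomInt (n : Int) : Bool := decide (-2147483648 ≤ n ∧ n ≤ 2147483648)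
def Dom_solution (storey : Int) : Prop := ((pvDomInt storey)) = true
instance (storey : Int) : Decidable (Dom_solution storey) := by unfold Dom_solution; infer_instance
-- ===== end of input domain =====

-- B replaces A's reversed-digit list with in-place carry and 5-look-ahead tie-break by a plain
-- two-way-min recursion on the number itself (objective: simpler).

-- ===== PORT A =====
-- int(digit) for one character of str(storey); on a digit character it is its value.
-- (For negative storey Python hits int('-') and raises ValueError: those inputs are outside
-- Pre_solution, so the .getD 0 default is never the claimed value.)
def pvDigitVal (c : Char) : Int := (PySem.Int.ofChars? [c]).getD 0

-- A's `for i in range(len(nums))` over the little-endian digit list, as the obvious recursion on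
-- the remaining suffix; the single mutation `nums[i+1] += 1` becomes the carried head (m+1) :: t.
def pvLoopA : List Int → Int
  | [] => 0
  | n :: rest =>
    if n < 5 ∨ (n = 5 ∧ (rest = [] ∨ (rest ≠ [] ∧ rest.headD 0 ≤ 4))) then
      n + pvLoopA rest
    else
      (10 - n) + (match rest with
        | [] => 1
        | m :: t => pvLoopA ((m + 1) :: t))
termination_by l => l.length
decreasing_by all_goals simp

def solution (storey : Int) : Int :=
  pvLoopA (((PySem.Int.toChars storey).reverse).map pvDigitVal)

-- ===== PORT B =====
-- Source B raises ValueError on storey < 0 (outside Pre_solution); the port's value there is unclaimed.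
def solution_alt (storey : Int) : Int :=
  if h : storey < 10 then min storey (11 - storey)
  else
    let d := PySem.Int.mod storey 10
    let rest := PySem.Int.floordiv storey 10
    min (d + solution_alt rest) ((10 - d) + solution_alt (rest + 1))
termination_by storey.toNat
decreasing_by
  all_goals
    rw [PySem.Int.floordiv_eq_ediv_of_pos (by norm_num : (0:Int) < 10)]
    omega

-- ===== PRECONDITION & SPEC =====
-- Pre_ excludes exactly the negative storeys: there str(storey) starts with '-', A's
-- per-character int() raises ValueError, and B raises ValueError as well.
def Pre_solution (storey : Int) : Prop := 0 ≤ storey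
instance (storey : Int) : Decidable (Pre_solution storey) := by unfold Pre_solution; infer_instance

def pvWitness_solution : Int := (42)

def Spec_solution (storey : Int) (out : Int) : Prop := out = solution_alt storey
instance (storey : Int) (out : Int) : Decidable (Spec_solution storey out) := by unfold Spec_solution; infer_instance

-- ===== CLAIM (what is proved, stated in full; the proofs are below) =====
def Claim_equal_solution : Prop := ∀ (storey : Int), Dom_solution storey → Pre_solution storey → Spec_solution storey (solution storey)

-- ===== LEMMAS AND PROOFS =====

-- B's port at a Nat argument (all proofs run over Nat digits).
def pvS (n : Nat) : Int := solution_alt (n : Int)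

theorem pvS_lt10 (n : Nat) (h : n < 10) : pvS n = min (n : Int) (11 - n) := by
  unfold pvS
  rw [solution_alt.eq_def, dif_pos (by exact_mod_cast h : (n : Int) < 10)]

theorem pvS_ge10 (n : Nat) (h : 10 ≤ n) :
    pvS n = min (((n % 10 : Nat) : Int) + pvS (n / 10))
              (((10 - n % 10 : Nat) : Int) + pvS (n / 10 + 1)) := by
  have e1 : PySem.Int.floordiv (n : Int) 10 = ((n / 10 : Nat) : Int) := by
    rw [PySem.Int.floordiv_eq_ediv_of_pos (by norm_num)]; omega
  have e2 : PySem.Int.mod (n : Int) 10 = ((n % 10 : Nat) : Int) := by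
    rw [PySem.Int.mod_eq_emod_of_pos (by norm_num)]; omega
  have e3 : ((10 - n % 10 : Nat) : Int) = 10 - ((n % 10 : Nat) : Int) := by omega
  have e4 : ((n / 10 : Nat) : Int) + 1 = ((n / 10 + 1 : Nat) : Int) := by push_cast; ring
  unfold pvS
  rw [solution_alt.eq_def, dif_neg (by omega : ¬ ((n : Int) < 10))]
  simp only [e1, e2, e4, e3]

-- Adjacent values of B differ by at most one button press.
theorem pvS_step (n : Nat) : pvS (n + 1) ≤ pvS n + 1 ∧ pvS n ≤ pvS (n + 1) + 1 := by
  induction n using Nat.strong_induction_on with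
  | _ n IH =>
    rcases Nat.lt_or_ge n 9 with h9 | h9
    · rw [pvS_lt10 n (by omega), pvS_lt10 (n + 1) (by omega)]
      omega
    · rcases Nat.eq_or_lt_of_le h9 with h9e | h10
      · have h1 := pvS_lt10 9 (by norm_num)
        have h2 := pvS_lt10 1 (by norm_num)
        have h3 := pvS_lt10 2 (by norm_num)
        have h4 := pvS_ge10 10 (by norm_num)
        norm_num at h4
        rw [← h9e]
        have e : (9 : Nat) + 1 = 10 := by norm_num
        rw [e]
        omega
      · have hn := pvS_ge10 n (by omega)
        rcases Nat.lt_or_ge (n % 10) 9 with hd | hd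
        · have hn1 := pvS_ge10 (n + 1) (by omega)
          have e1 : (n + 1) % 10 = n % 10 + 1 := by omega
          have e2 : (n + 1) / 10 = n / 10 := by omega
          rw [e1, e2] at hn1
          omega
        · have hn1 := pvS_ge10 (n + 1) (by omega)
          have e1 : (n + 1) % 10 = 0 := by omega
          have e2 : (n + 1) / 10 = n / 10 + 1 := by omega
          rw [e1, e2] at hn1
          have i1 := IH (n / 10) (by omega)
          have i2 := IH (n / 10 + 1) (by omega)
          omega

-- Rounding direction at a tie: B's value is monotone up/down according to the last digit.
theorem pvS_down (q : Nat) (h : q % 10 ≤ 4) : pvS q ≤ pvS (q + 1) := by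
  rcases Nat.lt_or_ge q 10 with hq | hq
  · rw [pvS_lt10 q hq, pvS_lt10 (q + 1) (by omega)]
    omega
  · have hn := pvS_ge10 q hq
    have hn1 := pvS_ge10 (q + 1) (by omega)
    have e1 : (q + 1) % 10 = q % 10 + 1 := by omega
    have e2 : (q + 1) / 10 = q / 10 := by omega
    rw [e1, e2] at hn1
    have st := pvS_step (q / 10)
    omega

theorem pvS_up (q : Nat) (h : 5 ≤ q % 10) : pvS (q + 1) ≤ pvS q := by
  rcases Nat.lt_or_ge q 10 with hq | hq
  · rcases Nat.lt_or_ge q 9 with hq9 | hq9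
    · rw [pvS_lt10 q hq, pvS_lt10 (q + 1) (by omega)]
      omega
    · have hq9' : q = 9 := by omega
      subst hq9'
      have h2 := pvS_lt10 1 (by norm_num)
      have h3 := pvS_lt10 2 (by norm_num)
      have h4 := pvS_ge10 10 (by norm_num)
      have h1 := pvS_lt10 9 (by norm_num)
      norm_num at h4
      have e : (9 : Nat) + 1 = 10 := by norm_num
      rw [e]
      omega
  · have hn := pvS_ge10 q hq
    rcases Nat.lt_or_ge (q % 10) 9 with hd | hd
    · have hn1 := pvS_ge10 (q + 1) (by omega)
      have e1 : (q + 1) % 10 = q % 10 + 1 := by omega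
      have e2 : (q + 1) / 10 = q / 10 := by omega
      rw [e1, e2] at hn1
      have st := pvS_step (q / 10)
      omega
    · have hn1 := pvS_ge10 (q + 1) (by omega)
      have e1 : (q + 1) % 10 = 0 := by omega
      have e2 : (q + 1) / 10 = q / 10 + 1 := by omega
      rw [e1, e2] at hn1
      have st := pvS_step (q / 10)
      have st2 := pvS_step (q / 10 + 1)
      omega

-- Little-endian digit list of n as A builds it (str(n) reversed, digit by digit).
def pvDigitsL (n : Nat) : List Int :=
  if n = 0 then [0] else (Nat.digits 10 n).map (fun (d : Nat) => (d : Int))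

theorem pvDigitsL_lt10 (n : Nat) (h : n < 10) : pvDigitsL n = [(n : Int)] := by
  unfold pvDigitsL
  rcases Nat.eq_zero_or_pos n with h0 | h0
  · subst h0; norm_num
  · rw [if_neg (by omega)]
    rw [Nat.digits_def' (by norm_num : 1 < 10) h0]
    rw [Nat.mod_eq_of_lt h, Nat.div_eq_of_lt h]
    norm_num

theorem pvDigitsL_ge10 (n : Nat) (h : 10 ≤ n) :
    pvDigitsL n = ((n % 10 : Nat) : Int) :: pvDigitsL (n / 10) := by
  unfold pvDigitsL
  rw [if_neg (by omega), if_neg (by omega : ¬ n / 10 = 0)]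
  rw [Nat.digits_def' (by norm_num : 1 < 10) (by omega : 0 < n)]
  simp

-- str(n) for n ≥ 0, characterised digit by digit.
def pvRep (n : Nat) : List Char :=
  if n = 0 then ['0'] else ((Nat.digits 10 n).map Nat.digitChar).reverse

theorem pvCore_small (f n : Nat) (acc : List Char) (h : n < 10) :
    Nat.toDigitsCore 10 (f + 1) n acc = pvRep n ++ acc := by
  have hn0 : n / 10 = 0 := by omega
  have step : Nat.toDigitsCore 10 (f + 1) n acc =
      if n / 10 = 0 then Nat.digitChar (n % 10) :: acc
      else Nat.toDigitsCore 10 f (n / 10) (Nat.digitChar (n % 10) :: acc) := rfl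
  rw [step, if_pos hn0]
  unfold pvRep
  rcases Nat.eq_zero_or_pos n with h0 | h0
  · subst h0; norm_num [Nat.digitChar]
  · rw [if_neg (by omega)]
    rw [Nat.digits_def' (by norm_num : 1 < 10) h0, hn0]
    rw [Nat.mod_eq_of_lt h]
    norm_num

theorem pvCore (f : Nat) : ∀ (n : Nat) (acc : List Char), n < 10 ^ (f + 1) →
    Nat.toDigitsCore 10 (f + 1) n acc = pvRep n ++ acc := by
  induction f with
  | zero =>
    intro n acc h
    exact pvCore_small 0 n acc (by simpa using h)
  | succ f IHf =>
    intro n acc h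
    rcases Nat.lt_or_ge n 10 with h10 | h10
    · exact pvCore_small (f + 1) n acc h10
    · have hn0 : ¬ n / 10 = 0 := by omega
      have step : Nat.toDigitsCore 10 (f + 1 + 1) n acc =
          if n / 10 = 0 then Nat.digitChar (n % 10) :: acc
          else Nat.toDigitsCore 10 (f + 1) (n / 10) (Nat.digitChar (n % 10) :: acc) := rfl
      rw [step, if_neg hn0]
      rw [IHf (n / 10) _ (by
        have : n < 10 ^ (f + 1) * 10 := by
          calc n < 10 ^ (f + 1 + 1) := h
          _ = 10 ^ (f + 1) * 10 := by ring
        omega)]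
      unfold pvRep
      rw [if_neg hn0, if_neg (by omega : ¬ n = 0)]
      rw [Nat.digits_def' (by norm_num : 1 < 10) (by omega : 0 < n)]
      simp

theorem pvToDigits (n : Nat) : Nat.toDigits 10 n = pvRep n := by
  have hlt : n < 10 ^ (n + 1) := by
    calc n < 2 ^ n := Nat.lt_two_pow_self
    _ ≤ 10 ^ n := Nat.pow_le_pow_left (by norm_num) n
    _ ≤ 10 ^ (n + 1) := Nat.pow_le_pow_right (by norm_num) (by omega)
  rw [Nat.toDigits, pvCore n n [] hlt]
  simp

theorem pvDigitVal_digitChar (d : Nat) (h : d < 10) :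
    pvDigitVal (Nat.digitChar d) = (d : Int) := by
  interval_cases d <;> decide

theorem pvNums_eq (n : Nat) :
    ((PySem.Int.toChars (n : Int)).reverse).map pvDigitVal = pvDigitsL n := by
  have ht : PySem.Int.toChars (n : Int) = Nat.toDigits 10 n := by
    unfold PySem.Int.toChars
    rw [if_neg (by omega : ¬ ((n : Int) < 0))]
    norm_num
  rw [ht, pvToDigits]
  unfold pvRep pvDigitsL
  rcases Nat.eq_zero_or_pos n with h0 | h0
  · subst h0; decide
  · rw [if_neg (by omega), if_neg (by omega)]
    rw [List.reverse_reverse, List.map_map]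
    apply List.map_congr_left
    intro d hd
    exact pvDigitVal_digitChar d (Nat.digits_lt_base (by norm_num) hd)

def pvBump : List Int → List Int
  | [] => []
  | m :: t => (m + 1) :: t

theorem pvMain (n : Nat) :
    pvLoopA (pvDigitsL n) = pvS n ∧ pvLoopA (pvBump (pvDigitsL n)) = pvS (n + 1) := by
  induction n using Nat.strong_induction_on with
  | _ n IH =>
    rcases Nat.lt_or_ge n 10 with h10 | h10
    · rw [pvDigitsL_lt10 n h10]
      constructor
      · rw [pvS_lt10 n h10]
        simp only [pvLoopA]
        split_ifs <;> simp_all <;> omega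
      · simp only [pvBump]
        rcases Nat.lt_or_ge n 9 with h9 | h9
        · have e : ((n : Int) + 1) = ((n + 1 : Nat) : Int) := by push_cast; ring
          rw [e, pvS_lt10 (n + 1) (by omega)]
          simp only [pvLoopA]
          split_ifs <;> simp_all <;> omega
        · have h9' : n = 9 := by omega
          subst h9'
          have h2 := pvS_lt10 1 (by norm_num)
          have h3 := pvS_lt10 2 (by norm_num)
          have h4 := pvS_ge10 10 (by norm_num)
          norm_num at h4
          have e : (9 : Nat) + 1 = 10 := by norm_num
          rw [e]
          simp only [pvLoopA]
          norm_num
          omega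
    · have IH1 := (IH (n / 10) (by omega)).1
      have IH2 := (IH (n / 10) (by omega)).2
      have hd := pvDigitsL_ge10 n h10
      have hne : pvDigitsL (n / 10) ≠ [] := by
        rcases Nat.lt_or_ge (n / 10) 10 with h | h
        · rw [pvDigitsL_lt10 _ h]; simp
        · rw [pvDigitsL_ge10 _ h]; simp
      obtain ⟨m, t, hmt⟩ : ∃ m t, pvDigitsL (n / 10) = m :: t := by
        cases hx : pvDigitsL (n / 10) with
        | nil => exact absurd hx hne
        | cons m t => exact ⟨m, t, rfl⟩
      have hm : m = ((n / 10 % 10 : Nat) : Int) := by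
        rcases Nat.lt_or_ge (n / 10) 10 with h | h
        · have hx := hmt.symm.trans (pvDigitsL_lt10 _ h)
          have h1 : m = ((n / 10 : Nat) : Int) := congrArg (fun l => l.headD 0) hx
          rw [h1, Nat.mod_eq_of_lt h]
        · have hx := hmt.symm.trans (pvDigitsL_ge10 _ h)
          exact congrArg (fun l => l.headD 0) hx
      subst hm
      have IH1' : pvLoopA (((n / 10 % 10 : Nat) : Int) :: t) = pvS (n / 10) := by
        rw [hmt] at IH1
        exact IH1
      have IH2' : pvLoopA ((((n / 10 % 10 : Nat) : Int) + 1) :: t) = pvS (n / 10 + 1) := by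
        rw [hmt] at IH2
        simpa [pvBump] using IH2
      have hSn := pvS_ge10 n h10
      rw [hd, hmt]
      constructor
      · simp only [pvLoopA, List.cons_ne_nil, ne_eq, not_false_eq_true, true_and, false_or,
          List.headD_cons]
        split_ifs with hcnd
        · rw [IH1', hSn]
          rcases hcnd with h5 | ⟨h5, h45⟩
          · have st := pvS_step (n / 10)
            omega
          · have hdn := pvS_down (n / 10) (by omega)
            omega
        · rw [IH2', hSn]
          by_cases h5 : n % 10 = 5
          · have hup := pvS_up (n / 10) (by omega)
            omega
          · have st := pvS_step (n / 10)
            omega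
      · simp only [pvBump]
        simp only [pvLoopA, List.cons_ne_nil, ne_eq, not_false_eq_true, true_and, false_or,
          List.headD_cons]
        have hSn1 := pvS_ge10 (n + 1) (by omega)
        rcases Nat.lt_or_ge (n % 10) 9 with hd8 | hd9
        · have e1 : (n + 1) % 10 = n % 10 + 1 := by omega
          have e2 : (n + 1) / 10 = n / 10 := by omega
          rw [e1, e2] at hSn1
          split_ifs with hcnd
          · rw [IH1', hSn1]
            rcases hcnd with h5 | ⟨h5, h45⟩
            · have st := pvS_step (n / 10)
              omega
            · have hdn := pvS_down (n / 10) (by omega)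
              omega
          · rw [IH2', hSn1]
            by_cases h5 : n % 10 + 1 = 5
            · have hup := pvS_up (n / 10) (by omega)
              omega
            · have st := pvS_step (n / 10)
              omega
        · have hd9' : n % 10 = 9 := by omega
          have e1 : (n + 1) % 10 = 0 := by omega
          have e2 : (n + 1) / 10 = n / 10 + 1 := by omega
          rw [e1, e2] at hSn1
          split_ifs with hcnd
          · exfalso
            omega
          · rw [IH2', hSn1]
            have st := pvS_step (n / 10 + 1)
            omega

-- ===== VERDICT (by name: the statement is the Claim_ definition above) =====
theorem solution_spec : Claim_equal_solution := by
  intro storey _ hpre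
  unfold Spec_solution solution Pre_solution at *
  have hn : storey = ((storey.toNat : Nat) : Int) := by omega
  rw [hn, pvNums_eq, (pvMain storey.toNat).1, pvS]
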